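-- pv_equiv track=rewrite | github.com/geoffreydatema/mindspawn | utils/utils.py | bitmapListTo2DArray
-- ===== SOURCE A (Python) =====
-- def bitmapListTo2DArray(data, row_size):
--     result = []
--     row = []
--     column_counter = 0
--     for pixel in data:
--         row.append(pixel)
--         column_counter += 1
--         if column_counter == row_size:
--             result.append(row)
--             column_counter = 0
--             row = []
--     return result
-- ===== SOURCE B (Python) =====
-- def bitmapListTo2DArray(data, row_size):
--     full = len(data) // row_size if row_size > 0 else 0
--     return [data[i * row_size:(i + 1) * row_size] for i in range(full)]
-- ===== Notes on version B (the rewrite author's own statement) =====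
-- stated objective: faster
-- what changed: Replaces the element-by-element accumulation into a running row with a column counter by computing the number of complete rows with floor division and slicing each row directly out of the flat list.
import Mathlib
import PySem

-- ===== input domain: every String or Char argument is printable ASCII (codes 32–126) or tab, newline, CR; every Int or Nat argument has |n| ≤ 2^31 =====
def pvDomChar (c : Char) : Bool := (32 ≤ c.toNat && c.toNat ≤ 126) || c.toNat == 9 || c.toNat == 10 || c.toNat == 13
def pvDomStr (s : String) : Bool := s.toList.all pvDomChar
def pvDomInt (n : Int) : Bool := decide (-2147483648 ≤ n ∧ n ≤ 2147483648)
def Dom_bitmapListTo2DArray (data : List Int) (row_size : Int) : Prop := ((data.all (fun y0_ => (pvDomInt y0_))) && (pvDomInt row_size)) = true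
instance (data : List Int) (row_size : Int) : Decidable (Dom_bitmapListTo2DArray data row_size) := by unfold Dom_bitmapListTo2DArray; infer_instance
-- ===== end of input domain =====

-- B replaces A's element-by-element row accumulation with floor division + direct slicing (objective: faster, constant-factor).

-- ===== PORT A =====
-- A's loop body as a step function on the state (result, row, column_counter)
def pvStepA (row_size : Int) (st : List (List Int) × List Int × Int) (pixel : Int) :
    List (List Int) × List Int × Int :=
  let row := st.2.1 ++ [pixel]
  let column_counter := st.2.2 + 1
  if column_counter = row_size then (st.1 ++ [row], [], 0) else (st.1, row, column_counter)

def bitmapListTo2DArray (data : List Int) (row_size : Int) : List (List Int) :=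
  (data.foldl (pvStepA row_size) ([], [], 0)).1

-- ===== PORT B =====
def bitmapListTo2DArray_alt (data : List Int) (row_size : Int) : List (List Int) :=
  let full : Int := if row_size > 0 then PySem.Int.floordiv (data.length : Int) row_size else 0
  (PySem.List.pyRange 0 full 1).map
    (fun i => PySem.List.slice data (some (i * row_size)) (some ((i + 1) * row_size)))

-- ===== PRECONDITION & SPEC =====
def Spec_bitmapListTo2DArray (data : List Int) (row_size : Int) (out : List (List Int)) : Prop := out = bitmapListTo2DArray_alt data row_size
instance (data : List Int) (row_size : Int) (out : List (List Int)) : Decidable (Spec_bitmapListTo2DArray data row_size out) := by unfold Spec_bitmapListTo2DArray; infer_instance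

-- ===== CLAIM (what is proved, stated in full; the proofs are below) =====
def Claim_equal_bitmapListTo2DArray : Prop := ∀ (data : List Int) (row_size : Int), Dom_bitmapListTo2DArray data row_size → Spec_bitmapListTo2DArray data row_size (bitmapListTo2DArray data row_size)

-- ===== LEMMAS AND PROOFS =====

-- reference chunking: n complete rows of width m, peeled off the front
def pvChunkRec (m : Nat) : Nat → List Int → List (List Int)
  | 0, _ => []
  | n + 1, l => l.take m :: pvChunkRec m n (l.drop m)

def pvChunkAll (m : Nat) (l : List Int) : List (List Int) := pvChunkRec m (l.length / m) l

lemma pvChunkAll_small {m : Nat} {l : List Int} (h : l.length < m) : pvChunkAll m l = [] := by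
  unfold pvChunkAll
  rw [Nat.div_eq_of_lt h]
  rfl

lemma pvChunkAll_step {m : Nat} {l : List Int} (hm : 0 < m) (h : m ≤ l.length) :
    pvChunkAll m l = l.take m :: pvChunkAll m (l.drop m) := by
  unfold pvChunkAll
  rw [Nat.div_eq_sub_div hm h]
  rw [List.length_drop]
  rfl

-- B computes pvChunkAll
lemma pvChunkRec_succ_right (m : Nat) : ∀ (n : Nat) (l : List Int),
    pvChunkRec m (n + 1) l = pvChunkRec m n l ++ [(l.drop (n * m)).take m] := by
  intro n
  induction n with
  | zero => intro l; simp [pvChunkRec]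
  | succ n ih =>
    intro l
    show l.take m :: pvChunkRec m (n + 1) (l.drop m)
        = (l.take m :: pvChunkRec m n (l.drop m)) ++ [(l.drop ((n + 1) * m)).take m]
    have e2 : (n + 1) * m = n * m + m := by ring
    rw [ih (l.drop m), List.drop_drop, e2]
    simp [Nat.add_comm]

lemma pvAlt_eq_chunkRec (m : Nat) : ∀ (n : Nat) (l : List Int),
    (List.range n).map
      (fun (j : Nat) => PySem.List.slice l (some ((j : Int) * (m : Int))) (some (((j : Int) + 1) * (m : Int))))
    = pvChunkRec m n l := by
  intro n
  induction n with
  | zero => intro l; rfl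
  | succ n ih =>
    intro l
    rw [List.range_succ, List.map_append, ih l, pvChunkRec_succ_right]
    congr 1
    simp only [List.map_cons, List.map_nil]
    congr 1
    have h3 : (n : Int) * (m : Int) = ((n * m : Nat) : Int) := by push_cast; ring
    have h4 : ((n : Int) + 1) * (m : Int) = (((n + 1) * m : Nat) : Int) := by push_cast; ring
    rw [h3, h4, PySem.List.slice_natCast]
    congr 1
    rw [show (n + 1) * m = n * m + m from by ring, Nat.add_sub_cancel_left]

lemma pvAlt_eq_chunkAll {m : Nat} (hm : 0 < m) (l : List Int) :
    bitmapListTo2DArray_alt l (m : Int) = pvChunkAll m l := by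
  simp only [bitmapListTo2DArray_alt]
  have hpos : ((m : Int) > 0) := by exact_mod_cast hm
  rw [if_pos hpos]
  rw [show ((l.length : Int)) = ((l.length : Nat) : Int) from rfl, PySem.Int.floordiv_natCast]
  rw [PySem.List.pyRange_zero_natCast]
  rw [List.map_map]
  unfold pvChunkAll
  rw [← pvAlt_eq_chunkRec m (l.length / m) l]
  apply List.map_congr_left
  intro j _
  simp [Function.comp]

-- A's loop, started with a partially filled row, computes the complete chunks of row ++ data
lemma pvLoopA_eq {m : Nat} (hm : 0 < m) : ∀ (data : List Int) (res : List (List Int)) (row : List Int),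
    row.length < m →
    (data.foldl (pvStepA (m : Int)) (res, row, (row.length : Int))).1
      = res ++ pvChunkAll m (row ++ data) := by
  intro data
  induction data with
  | nil =>
    intro res row hrow
    simp [pvChunkAll_small hrow]
  | cons p rest ih =>
    intro res row hrow
    simp only [List.foldl_cons]
    by_cases hc : row.length + 1 = m
    · have hcond : (row.length : Int) + 1 = (m : Int) := by exact_mod_cast hc
      have hstep : pvStepA (m : Int) (res, row, (row.length : Int)) p = (res ++ [row ++ [p]], [], 0) := by
        simp [pvStepA, hcond]
      rw [hstep]
      have h0 : (0 : Int) = (([] : List Int).length : Int) := by simp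
      rw [h0, ih (res ++ [row ++ [p]]) [] (by simpa using hm)]
      have hlen : (row ++ [p]).length = m := by simp [hc]
      have hge : m ≤ (row ++ p :: rest).length := by simp; omega
      rw [pvChunkAll_step hm hge]
      have hsplit : row ++ p :: rest = (row ++ [p]) ++ rest := by simp
      rw [hsplit, List.take_left' hlen, List.drop_left' hlen]
      simp
    · have hcond : ¬ ((row.length : Int) + 1 = (m : Int)) := by
        intro h; exact hc (by exact_mod_cast h)
      have hstep : pvStepA (m : Int) (res, row, (row.length : Int)) p
          = (res, row ++ [p], (row.length : Int) + 1) := by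
        simp [pvStepA, hcond]
      rw [hstep]
      have hlen : ((row ++ [p]).length : Int) = (row.length : Int) + 1 := by simp
      rw [← hlen, ih res (row ++ [p]) (by simp; omega)]
      simp

-- with row_size ≤ 0 the counter (always ≥ 0 after increments) never equals row_size
lemma pvLoopA_nonpos {k : Int} (hk : k ≤ 0) : ∀ (data : List Int) (res : List (List Int)) (row : List Int) (c : Int),
    0 ≤ c → (data.foldl (pvStepA k) (res, row, c)).1 = res := by
  intro data
  induction data with
  | nil => intro res row c _; rfl
  | cons p rest ih =>
    intro res row c hc
    simp only [List.foldl_cons]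
    have hcond : ¬ (c + 1 = k) := by omega
    have hstep : pvStepA k (res, row, c) p = (res, row ++ [p], c + 1) := by
      simp [pvStepA, hcond]
    rw [hstep]
    exact ih res (row ++ [p]) (c + 1) (by omega)

-- ===== VERDICT (by name: the statement is the Claim_ definition above) =====
theorem bitmapListTo2DArray_spec : Claim_equal_bitmapListTo2DArray := by
  intro data row_size _
  unfold Spec_bitmapListTo2DArray
  by_cases hpos : 0 < row_size
  · have hm : 0 < row_size.toNat := by omega
    have hk : row_size = (row_size.toNat : Int) := by omega
    rw [hk]
    unfold bitmapListTo2DArray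
    have h0 : ((0 : Int)) = ((([] : List Int).length : Nat) : Int) := by simp
    rw [pvAlt_eq_chunkAll hm]
    calc (data.foldl (pvStepA (row_size.toNat : Int)) ([], [], 0)).1
        = (data.foldl (pvStepA (row_size.toNat : Int)) ([], [], (([] : List Int).length : Int))).1 := by simp
      _ = [] ++ pvChunkAll row_size.toNat ([] ++ data) := pvLoopA_eq hm data [] [] (by simpa using hm)
      _ = pvChunkAll row_size.toNat data := by simp
  · have hk : row_size ≤ 0 := by omega
    simp only [bitmapListTo2DArray, bitmapListTo2DArray_alt]
    rw [pvLoopA_nonpos hk data [] [] 0 (le_refl 0), if_neg hpos,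
      PySem.List.pyRange_one_eq_nil (le_refl 0)]
    rfl
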